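-- pv_equiv track=rewrite | github.com/duartebarbosadev/PhotoSort | src/ui/controllers/navigation_controller.py | navigate_group_cyclic
-- ===== SOURCE A (Python) =====
-- from typing import List, Optional, Iterable, Protocol, Set
--
-- def navigate_group_cyclic(
--     group_paths: List[str],
--     current: Optional[str],
--     direction: str,
--     skip_deleted: bool,
--     deleted_set: Set[str],
-- ) -> Optional[str]:
--     if not group_paths:
--         return None
--     if current not in group_paths:
--         return group_paths[0] if direction == "right" else group_paths[-1]
--     idx = group_paths.index(current)
--     step = -1 if direction == "left" else 1
--     for _ in range(len(group_paths)):
--         idx = (idx + step) % len(group_paths)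
--         candidate = group_paths[idx]
--         if not skip_deleted or candidate not in deleted_set:
--             return candidate
--     return None
-- ===== SOURCE B (Python) =====
-- def navigate_group_cyclic(group_paths, current, direction, skip_deleted, deleted_set):
--     if not group_paths:
--         return None
--     if current not in group_paths:
--         return group_paths[0] if direction == "right" else group_paths[-1]
--     idx = group_paths.index(current)
--     if direction == "left":
--         order = list(reversed(group_paths[:idx])) + list(reversed(group_paths[idx:]))
--     else:
--         order = group_paths[idx + 1:] + group_paths[:idx + 1]
--     for candidate in order:
--         if not skip_deleted or candidate not in deleted_set:
--             return candidate
--     return None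
-- ===== Notes on version B (the rewrite author's own statement) =====
-- stated objective: alternative
-- what changed: Replaces the modular-index stepping loop with building the rotated (wrap-around) candidate list via slices once and scanning it with a plain first-match loop.
import Mathlib
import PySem

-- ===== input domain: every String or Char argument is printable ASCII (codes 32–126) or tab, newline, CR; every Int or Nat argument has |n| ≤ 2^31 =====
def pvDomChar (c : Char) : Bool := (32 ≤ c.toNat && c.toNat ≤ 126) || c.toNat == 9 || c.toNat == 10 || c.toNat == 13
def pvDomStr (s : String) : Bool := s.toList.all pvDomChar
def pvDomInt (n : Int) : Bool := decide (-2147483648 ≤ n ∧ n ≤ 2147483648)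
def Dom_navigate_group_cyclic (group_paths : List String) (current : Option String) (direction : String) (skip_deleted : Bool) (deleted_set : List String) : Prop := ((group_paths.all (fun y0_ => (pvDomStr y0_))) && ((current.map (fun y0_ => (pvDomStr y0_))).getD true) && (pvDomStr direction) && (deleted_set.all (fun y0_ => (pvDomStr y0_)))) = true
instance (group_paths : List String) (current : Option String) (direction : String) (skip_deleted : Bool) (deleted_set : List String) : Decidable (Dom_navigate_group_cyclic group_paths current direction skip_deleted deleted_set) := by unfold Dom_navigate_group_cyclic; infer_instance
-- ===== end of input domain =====

-- B replaces A's modular-index stepping loop by building the rotated candidate list via slices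
-- once and scanning it with a plain first-match loop (objective: alternative decomposition).

-- ===== PORT A =====
-- A's 'for _ in range(len(group_paths))' loop: fuel counts remaining iterations, idx is the Python int index.
def pvLoopA (gp : List String) (skip_deleted : Bool) (deleted_set : List String) (step : Int) : Nat → Int → Option String
  | 0, _ => none
  | fuel + 1, idx =>
    let idx' := PySem.Int.mod (idx + step) (gp.length : Int)
    match PySem.List.pyGet? gp idx' with
    | none => none   -- unreachable: idx' is in range since gp ≠ []
    | some candidate =>
      if !skip_deleted || !(deleted_set.contains candidate) then some candidate
      else pvLoopA gp skip_deleted deleted_set step fuel idx'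

def navigate_group_cyclic (group_paths : List String) (current : Option String) (direction : String) (skip_deleted : Bool) (deleted_set : List String) : Option String :=
  if group_paths = [] then none
  else if !(match current with | some c => group_paths.contains c | none => false) then
    (if direction = "right" then PySem.List.pyGet? group_paths 0 else PySem.List.pyGet? group_paths (-1))
  else
    match current with
    | none => none   -- unreachable: current ∈ group_paths here
    | some c =>
      match PySem.List.index? group_paths c with
      | none => none -- unreachable: c ∈ group_paths here
      | some idx =>
        pvLoopA group_paths skip_deleted deleted_set (if direction = "left" then -1 else 1) group_paths.length (idx : Int)

-- ===== PORT B =====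
-- B's 'for candidate in order: if …: return candidate' loop.
def pvFirstOk (skip_deleted : Bool) (deleted_set : List String) : List String → Option String
  | [] => none
  | c :: rest =>
    if !skip_deleted || !(deleted_set.contains c) then some c
    else pvFirstOk skip_deleted deleted_set rest

def navigate_group_cyclic_alt (group_paths : List String) (current : Option String) (direction : String) (skip_deleted : Bool) (deleted_set : List String) : Option String :=
  if group_paths = [] then none
  else if !(match current with | some c => group_paths.contains c | none => false) then
    (if direction = "right" then PySem.List.pyGet? group_paths 0 else PySem.List.pyGet? group_paths (-1))
  else
    match current with
    | none => none
    | some c =>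
      match PySem.List.index? group_paths c with
      | none => none
      | some idx =>
        let order :=
          if direction = "left" then
            (PySem.List.slice group_paths none (some (idx : Int))).reverse
              ++ (PySem.List.slice group_paths (some (idx : Int)) none).reverse
          else
            PySem.List.slice group_paths (some ((idx : Int) + 1)) none
              ++ PySem.List.slice group_paths none (some ((idx : Int) + 1))
        pvFirstOk skip_deleted deleted_set order

-- ===== PRECONDITION & SPEC =====
def Spec_navigate_group_cyclic (group_paths : List String) (current : Option String) (direction : String) (skip_deleted : Bool) (deleted_set : List String) (out : Option String) : Prop := out = navigate_group_cyclic_alt group_paths current direction skip_deleted deleted_set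
instance (group_paths : List String) (current : Option String) (direction : String) (skip_deleted : Bool) (deleted_set : List String) (out : Option String) : Decidable (Spec_navigate_group_cyclic group_paths current direction skip_deleted deleted_set out) := by unfold Spec_navigate_group_cyclic; infer_instance

-- ===== CLAIM (what is proved, stated in full; the proofs are below) =====
def Claim_equal_navigate_group_cyclic : Prop := ∀ (group_paths : List String) (current : Option String) (direction : String) (skip_deleted : Bool) (deleted_set : List String), Dom_navigate_group_cyclic group_paths current direction skip_deleted deleted_set → Spec_navigate_group_cyclic group_paths current direction skip_deleted deleted_set (navigate_group_cyclic group_paths current direction skip_deleted deleted_set)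

-- ===== LEMMAS AND PROOFS =====

-- Python '(j + 1) % n' on a Nat index, as a Nat.
theorem pv_mod_add_one (j n : Nat) (hn : 0 < n) :
    PySem.Int.mod ((j : Int) + 1) (n : Int) = (((j + 1) % n : Nat) : Int) := by
  rw [PySem.Int.mod_eq_emod_of_pos (by exact_mod_cast hn)]
  push_cast
  try rfl

-- Python '(j - 1) % n' on a Nat index, as a Nat.
theorem pv_mod_sub_one (j n : Nat) (hn : 0 < n) :
    PySem.Int.mod ((j : Int) + (-1)) (n : Int) = (((j + (n - 1)) % n : Nat) : Int) := by
  rw [PySem.Int.mod_eq_emod_of_pos (by exact_mod_cast hn)]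
  have e : (j : Int) + (-1) = ((j + (n - 1) : Nat) : Int) + (n : Int) * (-1) := by
    push_cast; omega
  rw [e, Int.add_mul_emod_self_left]
  push_cast
  try rfl

theorem take_append_snoc {α : Type} (l t : List α) (x : α) (f : Nat) (hf : f ≤ l.length + t.length) :
    ((l ++ (t ++ [x])).take f) = ((l ++ t).take f) := by
  rw [← List.append_assoc]
  rw [List.take_append_of_le_length (by simp; omega)]

theorem loop_right (gp : List String) (sk : Bool) (del : List String) :
    ∀ (f j : Nat), j < gp.length → f ≤ gp.length →
    pvLoopA gp sk del 1 f (j : Int)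
      = pvFirstOk sk del ((gp.drop (j + 1) ++ gp.take (j + 1)).take f) := by
  intro f
  induction f with
  | zero => intro j hj hf; simp [pvLoopA, pvFirstOk]
  | succ f ih =>
    intro j hj hf
    have hn : 0 < gp.length := by omega
    rw [pvLoopA]
    simp only [pv_mod_add_one j gp.length hn, PySem.List.pyGet?_natCast]
    by_cases hlt : j + 1 < gp.length
    · have hm : (j + 1) % gp.length = j + 1 := Nat.mod_eq_of_lt hlt
      rw [hm, List.getElem?_eq_getElem hlt]
      have hdrop : gp.drop (j + 1) = gp[j + 1] :: gp.drop (j + 2) := List.drop_eq_getElem_cons hlt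
      rw [hdrop]
      simp only [List.cons_append, List.take_succ_cons, pvFirstOk]
      cases hc : (!sk || !(del.contains gp[j + 1])) with
      | true => simp
      | false =>
        rw [if_neg (by simp), if_neg (by simp)]
        rw [ih (j + 1) hlt (by omega)]
        congr 1
        have htake : gp.take (j + 1 + 1) = gp.take (j + 1) ++ [gp[j + 1]] := by
          rw [List.take_succ, List.getElem?_eq_getElem hlt]; rfl
        rw [htake, show j + 1 + 1 = j + 2 from rfl]
        exact take_append_snoc (gp.drop (j + 2)) (gp.take (j + 1)) gp[j + 1] f
          (by simp; omega)
    · have hj1 : j + 1 = gp.length := by omega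
      have hm : (j + 1) % gp.length = 0 := by rw [hj1, Nat.mod_self]
      rw [hm, List.getElem?_eq_getElem hn]
      have hfull : gp.drop (j + 1) ++ gp.take (j + 1) = gp := by
        rw [hj1]; simp
      rw [hfull]
      have hdrop0 : gp = gp[0] :: gp.drop 1 := List.drop_eq_getElem_cons hn
      conv_rhs => rw [hdrop0]
      simp only [List.take_succ_cons, pvFirstOk]
      cases hc : (!sk || !(del.contains gp[0])) with
      | true => simp
      | false =>
        rw [if_neg (by simp), if_neg (by simp)]
        rw [ih 0 hn (by omega)]
        congr 1
        have htake1 : gp.take (0 + 1) = [gp[0]] := by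
          rw [List.take_succ, List.getElem?_eq_getElem hn]; rfl
        rw [htake1]
        have := take_append_snoc (gp.drop 1) [] gp[0] f (by simp; omega)
        simpa using this

theorem loop_left (gp : List String) (sk : Bool) (del : List String) :
    ∀ (f j : Nat), j < gp.length → f ≤ gp.length →
    pvLoopA gp sk del (-1) f (j : Int)
      = pvFirstOk sk del (((gp.take j).reverse ++ (gp.drop j).reverse).take f) := by
  intro f
  induction f with
  | zero => intro j hj hf; simp [pvLoopA, pvFirstOk]
  | succ f ih =>
    intro j hj hf
    have hn : 0 < gp.length := by omega
    rw [pvLoopA]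
    simp only [pv_mod_sub_one j gp.length hn, PySem.List.pyGet?_natCast]
    by_cases hpos : 0 < j
    · have hm : (j + (gp.length - 1)) % gp.length = j - 1 := by
        have e : j + (gp.length - 1) = (j - 1) + 1 * gp.length := by omega
        rw [e, Nat.add_mul_mod_self_right, Nat.mod_eq_of_lt (by omega)]
      have hj1 : j - 1 < gp.length := by omega
      rw [hm, List.getElem?_eq_getElem hj1]
      have htake : gp.take j = gp.take (j - 1) ++ [gp[j - 1]] := by
        conv_lhs => rw [show j = (j - 1) + 1 by omega]
        rw [List.take_succ, List.getElem?_eq_getElem hj1]; rfl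
      rw [htake]
      simp only [List.reverse_append, List.reverse_singleton,
        List.cons_append, List.take_succ_cons, pvFirstOk]
      cases hc : (!sk || !(del.contains gp[j - 1])) with
      | true => simp
      | false =>
        rw [if_neg (by simp), if_neg (by simp)]
        rw [ih (j - 1) hj1 (by omega)]
        congr 1
        have hdrop : gp.drop (j - 1) = gp[j - 1] :: gp.drop j := by
          have h := List.drop_eq_getElem_cons (l := gp) hj1
          rwa [show j - 1 + 1 = j by omega] at h
        rw [hdrop, List.reverse_cons]
        exact take_append_snoc ((gp.take (j - 1)).reverse) ((gp.drop j).reverse) gp[j - 1] f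
          (by simp; omega)
    · have hj0 : j = 0 := by omega
      subst hj0
      have hm : (0 + (gp.length - 1)) % gp.length = gp.length - 1 := by
        rw [Nat.zero_add, Nat.mod_eq_of_lt (by omega)]
      have hl1 : gp.length - 1 < gp.length := by omega
      rw [hm, List.getElem?_eq_getElem hl1]
      have h := List.take_succ (l := gp) (i := gp.length - 1)
      rw [List.getElem?_eq_getElem hl1] at h
      rw [show gp.length - 1 + 1 = gp.length by omega, List.take_length] at h
      have hgp : gp.reverse = gp[gp.length - 1] :: (gp.take (gp.length - 1)).reverse := by
        conv_lhs => rw [h]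
        simp
      conv_rhs => rw [show ((gp.take 0).reverse ++ (gp.drop 0).reverse) = gp.reverse by simp, hgp]
      simp only [List.take_succ_cons, pvFirstOk]
      cases hc : (!sk || !(del.contains gp[gp.length - 1])) with
      | true => simp
      | false =>
        rw [if_neg (by simp), if_neg (by simp)]
        rw [ih (gp.length - 1) hl1 (by omega)]
        congr 1
        have hdropl : gp.drop (gp.length - 1) = [gp[gp.length - 1]] := by
          have h := List.drop_eq_getElem_cons (l := gp) hl1
          rwa [show gp.length - 1 + 1 = gp.length by omega, List.drop_length] at h
        rw [hdropl, List.reverse_singleton]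
        have := take_append_snoc ((gp.take (gp.length - 1)).reverse) [] gp[gp.length - 1] f
          (by simp; omega)
        simpa using this

-- ===== VERDICT (by name: the statement is the Claim_ definition above) =====
-- The common branch once current = some c is known: index lookup, then loop vs rotated scan.
theorem pv_branch (gp : List String) (direction : String) (sk : Bool) (del : List String)
    (c : String) (hn : 0 < gp.length) :
    (match PySem.List.index? gp c with
      | none => none
      | some idx => pvLoopA gp sk del (if direction = "left" then -1 else 1) gp.length (idx : Int))
    = (match PySem.List.index? gp c with
      | none => none
      | some idx =>
        let order :=
          if direction = "left" then
            (PySem.List.slice gp none (some (idx : Int))).reverse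
              ++ (PySem.List.slice gp (some (idx : Int)) none).reverse
          else
            PySem.List.slice gp (some ((idx : Int) + 1)) none
              ++ PySem.List.slice gp none (some ((idx : Int) + 1))
        pvFirstOk sk del order) := by
  cases hidx : PySem.List.index? gp c with
  | none => rfl
  | some idx =>
    obtain ⟨hlt, -, -⟩ := PySem.List.getElem_of_index?_eq_some hidx
    show pvLoopA gp sk del (if direction = "left" then -1 else 1) gp.length (idx : Int)
      = pvFirstOk sk del
          (if direction = "left" then
            (PySem.List.slice gp none (some (idx : Int))).reverse
              ++ (PySem.List.slice gp (some (idx : Int)) none).reverse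
          else
            PySem.List.slice gp (some ((idx : Int) + 1)) none
              ++ PySem.List.slice gp none (some ((idx : Int) + 1)))
    by_cases hdir : direction = "left"
    · rw [if_pos hdir, if_pos hdir]
      rw [loop_left gp sk del gp.length idx hlt (le_refl _)]
      rw [PySem.List.slice_to_natCast, PySem.List.slice_from_natCast]
      rw [List.take_of_length_le (by simp; omega)]
    · rw [if_neg hdir, if_neg hdir]
      rw [loop_right gp sk del gp.length idx hlt (le_refl _)]
      rw [show ((idx : Int) + 1) = (((idx + 1 : Nat)) : Int) by push_cast; ring]
      rw [PySem.List.slice_to_natCast, PySem.List.slice_from_natCast]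
      rw [List.take_of_length_le (by simp; omega)]

theorem navigate_group_cyclic_spec : Claim_equal_navigate_group_cyclic := by
  intro gp current direction sk del hD
  clear hD
  unfold Spec_navigate_group_cyclic navigate_group_cyclic navigate_group_cyclic_alt
  cases current with
  | none => rfl
  | some c =>
    by_cases hgp : gp = []
    · simp [hgp]
    rw [if_neg hgp, if_neg hgp]
    have hn : 0 < gp.length := by
      cases gp with | nil => exact absurd rfl hgp | cons a t => simp
    by_cases hc : c ∈ gp
    · have hmatch : (!(match (some c : Option String) with
          | some c => gp.contains c | none => false)) = false := by
        simp [hc]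
      have hft : ¬(false = true) := by simp
      rw [hmatch, if_neg hft, if_neg hft]
      exact pv_branch gp direction sk del c hn
    · have hmatch : (!(match (some c : Option String) with
          | some c => gp.contains c | none => false)) = true := by
        simp [hc]
      rw [hmatch, if_pos rfl, if_pos rfl]
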